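-- pv_equiv track=rewrite | github.com/jplopezinnohunt/abapobjectscreation | Zagentexecution/scrp_temp/execute_risks_and_actions.py | components_for_risk
-- ===== SOURCE A (Python) =====
-- def components_for_risk(owner_text):
--     out = []
--     ot = owner_text.upper()
--     if 'FM' in ot or 'DBM' in ot or 'FIN' in ot:
--         out.append('FM')
--     if 'PS' in ot or 'WBS' in ot or 'EPM' in ot or 'BSP' in ot:
--         out.append('PS-WBS')
--     if 'BSP' in ot or 'BP' in ot or 'GM' in ot:
--         out.append('BP-GM')
--     if not out:
--         out.append('Governance')
--     # Dedupe while preserving order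
--     seen = set()
--     return [x for x in out if not (x in seen or seen.add(x))]
-- ===== SOURCE B (Python) =====
-- PAT_TAG = [('FM', 'FM'), ('DBM', 'FM'), ('FIN', 'FM'),
--            ('PS', 'PS-WBS'), ('WBS', 'PS-WBS'), ('EPM', 'PS-WBS'), ('BSP', 'PS-WBS'),
--            ('BSP', 'BP-GM'), ('BP', 'BP-GM'), ('GM', 'BP-GM')]
-- TAG_ORDER = ['FM', 'PS-WBS', 'BP-GM']
--
-- def components_for_risk(owner_text):
--     ot = owner_text.upper()
--     hit = set()
--     for i in range(len(ot)):
--         for pat, tag in PAT_TAG: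
--             if ot.startswith(pat, i):
--                 hit.add(tag)
--     res = [t for t in TAG_ORDER if t in hit]
--     return res if res else ['Governance']
-- ===== Notes on version B (the rewrite author's own statement) =====
-- stated objective: alternative
-- what changed: Instead of A's three hard-coded group-wise substring if-chains plus a dead order-preserving dedup pass, B does one left-to-right scan over the positions of the uppercased text, matching a flat pattern->tag table at each position into a hit-set, then emits tags in canonical order with a Governance fallback.
import Mathlib
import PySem

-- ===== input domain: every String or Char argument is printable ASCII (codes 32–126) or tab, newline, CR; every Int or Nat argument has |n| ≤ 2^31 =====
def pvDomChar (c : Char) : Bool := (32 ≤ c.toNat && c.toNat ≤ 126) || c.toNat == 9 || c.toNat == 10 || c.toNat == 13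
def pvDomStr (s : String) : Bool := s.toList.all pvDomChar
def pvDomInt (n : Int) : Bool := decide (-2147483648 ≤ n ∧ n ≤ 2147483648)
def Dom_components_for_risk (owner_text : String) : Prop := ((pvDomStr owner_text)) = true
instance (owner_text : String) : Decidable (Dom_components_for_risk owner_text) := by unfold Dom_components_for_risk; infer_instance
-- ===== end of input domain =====

-- B replaces A's three hard-coded substring if-chains (plus a dead dedup pass) with a single left-to-right
-- scan over the positions of the uppercased text that matches a flat pattern->tag table at each position into
-- a hit-set, then emits tags in canonical order (alternative decomposition; same cost).


-- ===== PORT A =====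
def components_for_risk (owner_text : String) : List String :=
  let ot := PySem.Str.upper owner_text
  let out : List String := []
  let out := if PySem.Str.isIn "FM" ot || PySem.Str.isIn "DBM" ot || PySem.Str.isIn "FIN" ot
             then out ++ ["FM"] else out
  let out := if PySem.Str.isIn "PS" ot || PySem.Str.isIn "WBS" ot || PySem.Str.isIn "EPM" ot || PySem.Str.isIn "BSP" ot
             then out ++ ["PS-WBS"] else out
  let out := if PySem.Str.isIn "BSP" ot || PySem.Str.isIn "BP" ot || PySem.Str.isIn "GM" ot
             then out ++ ["BP-GM"] else out
  let out := if out = [] then out ++ ["Governance"] else out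
  -- '[x for x in out if not (x in seen or seen.add(x))]' with seen a growing set
  (out.foldl (fun (p : PySem.Set String × List String) x =>
      if x ∈ p.1 then p else (p.1.add x, p.2 ++ [x])) ((PySem.Set.ofList []), [])).2

-- ===== PORT B =====
def pvPatTag : List (String × String) :=
  [("FM", "FM"), ("DBM", "FM"), ("FIN", "FM"),
   ("PS", "PS-WBS"), ("WBS", "PS-WBS"), ("EPM", "PS-WBS"), ("BSP", "PS-WBS"),
   ("BSP", "BP-GM"), ("BP", "BP-GM"), ("GM", "BP-GM")]

def pvTagOrder : List String := ["FM", "PS-WBS", "BP-GM"]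

-- 'ot.startswith(pat, i)' with 0 ≤ i is ported exactly as: pat is a prefix of the i-suffix of ot.
def components_for_risk_alt (owner_text : String) : List String :=
  let ot := PySem.Str.upper owner_text
  let hit : PySem.Set String :=
    (PySem.List.pyRange 0 (PySem.Str.len ot) 1).foldl
      (fun h i => pvPatTag.foldl
        (fun h' pt => if PySem.Chars.startswith (ot.toList.drop i.toNat) pt.1.toList
                      then PySem.Set.add h' pt.2 else h') h)
      PySem.Set.empty
  let res := pvTagOrder.filter (fun t => PySem.Set.contains hit t)
  if res = [] then ["Governance"] else res

-- ===== PRECONDITION & SPEC =====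
def Spec_components_for_risk (owner_text : String) (out : List String) : Prop := out = components_for_risk_alt owner_text
instance (owner_text : String) (out : List String) : Decidable (Spec_components_for_risk owner_text out) := by unfold Spec_components_for_risk; infer_instance

-- ===== CLAIM (what is proved, stated in full; the proofs are below) =====
def Claim_equal_components_for_risk : Prop := ∀ (owner_text : String), Dom_components_for_risk owner_text → Spec_components_for_risk owner_text (components_for_risk owner_text)

-- ===== LEMMAS AND PROOFS =====

-- membership in a fold that conditionally adds, step characterised pointwise
lemma mem_foldl_of_step {α β : Type} [BEq α] [LawfulBEq α] (x : α)
    (g : PySem.Set α → β → PySem.Set α) (P : β → Prop)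
    (hg : ∀ h i, x ∈ g h i ↔ x ∈ h ∨ P i) :
    ∀ (l : List β) (h : PySem.Set α), x ∈ l.foldl g h ↔ x ∈ h ∨ ∃ i ∈ l, P i := by
  intro l
  induction l with
  | nil => intro h; simp
  | cons a l ih =>
    intro h
    simp only [List.foldl_cons, ih, hg, List.mem_cons]
    constructor
    · rintro (((hx | hp) | ⟨i, hi, hp⟩))
      · exact Or.inl hx
      · exact Or.inr ⟨a, Or.inl rfl, hp⟩
      · exact Or.inr ⟨i, Or.inr hi, hp⟩
    · rintro (hx | ⟨i, (rfl | hi), hp⟩)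
      · exact Or.inl (Or.inl hx)
      · exact Or.inl (Or.inr hp)
      · exact Or.inr ⟨i, hi, hp⟩

-- membership in the inner fold over the pattern table
lemma mem_foldl_condAdd {α β : Type} [BEq α] [LawfulBEq α] (x : α) (c : β → Bool) (t : β → α) :
    ∀ (l : List β) (h : PySem.Set α),
      x ∈ l.foldl (fun h' b => if c b then PySem.Set.add h' (t b) else h') h ↔
        x ∈ h ∨ ∃ b ∈ l, c b = true ∧ x = t b := by
  intro l
  induction l with
  | nil => intro h; simp
  | cons a l ih =>
    intro h
    simp only [List.foldl_cons, ih, List.mem_cons]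
    by_cases hc : c a
    · simp only [hc, if_true, PySem.Set.mem_add]
      constructor
      · rintro ((hx | rfl) | ⟨b, hb, hcb, rfl⟩)
        · exact Or.inl hx
        · exact Or.inr ⟨a, Or.inl rfl, hc, rfl⟩
        · exact Or.inr ⟨b, Or.inr hb, hcb, rfl⟩
      · rintro (hx | ⟨b, (rfl | hb), hcb, rfl⟩)
        · exact Or.inl (Or.inl hx)
        · exact Or.inl (Or.inr rfl)
        · exact Or.inr ⟨b, hb, hcb, rfl⟩
    · simp only [hc, if_false, Bool.false_eq_true]
      constructor
      · rintro (hx | ⟨b, hb, hcb, rfl⟩)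
        · exact Or.inl hx
        · exact Or.inr ⟨b, Or.inr hb, hcb, rfl⟩
      · rintro (hx | ⟨b, (rfl | hb), hcb, rfl⟩)
        · exact Or.inl hx
        · exact (hc hcb).elim
        · exact Or.inr ⟨b, hb, hcb, rfl⟩

-- 'pat occurs at some position of cs' is exactly 'pat in cs' (pat nonempty)
lemma exists_pos_startswith_iff (cs pat : List Char) (hp : pat ≠ []) :
    (∃ i ∈ PySem.List.pyRange 0 (cs.length : Int) 1,
        PySem.Chars.startswith (List.drop i.toNat cs) pat = true) ↔
      PySem.Chars.isIn pat cs = true := by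
  constructor
  · rintro ⟨i, _, hs⟩
    exact (PySem.Chars.exists_prefix_drop_iff_isIn pat cs).1
      ⟨i.toNat, (PySem.Chars.startswith_iff _ _).1 hs⟩
  · intro h
    obtain ⟨j, hj⟩ := (PySem.Chars.exists_prefix_drop_iff_isIn pat cs).2 h
    have hjlt : j < cs.length := by
      by_contra hge
      rw [List.drop_eq_nil_of_le (by omega)] at hj
      exact hp (List.prefix_nil.mp hj)
    refine ⟨(j : Int), PySem.List.mem_pyRange_one.2 ⟨by positivity, by exact_mod_cast hjlt⟩, ?_⟩
    rw [Int.toNat_natCast]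
    exact (PySem.Chars.startswith_iff _ _).2 hj

-- a tag is in the hit-set iff some table row carries it and its pattern is a substring of the text
lemma mem_hit_iff (ot : String) (x : String) :
    (x ∈ (PySem.List.pyRange 0 (PySem.Str.len ot) 1).foldl
      (fun h i => pvPatTag.foldl
        (fun h' pt => if PySem.Chars.startswith (ot.toList.drop i.toNat) pt.1.toList
                      then PySem.Set.add h' pt.2 else h') h)
      PySem.Set.empty) ↔
    ∃ pt ∈ pvPatTag, x = pt.2 ∧ PySem.Str.isIn pt.1 ot = true := by
  have hstep := mem_foldl_of_step x
    (fun h i => pvPatTag.foldl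
      (fun h' pt => if PySem.Chars.startswith (ot.toList.drop i.toNat) pt.1.toList
                    then PySem.Set.add h' pt.2 else h') h)
    (fun i => ∃ pt ∈ pvPatTag,
        PySem.Chars.startswith (ot.toList.drop i.toNat) pt.1.toList = true ∧ x = pt.2)
    (fun h i => mem_foldl_condAdd x
      (fun pt => PySem.Chars.startswith (ot.toList.drop i.toNat) pt.1.toList) Prod.snd pvPatTag h)
    (PySem.List.pyRange 0 (PySem.Str.len ot) 1) PySem.Set.empty
  rw [hstep]
  simp only [PySem.Set.empty, List.not_mem_nil, false_or, PySem.Str.len_eq]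
  have hne : ∀ pt ∈ pvPatTag, pt.1.toList ≠ [] := by decide
  constructor
  · rintro ⟨i, hi, pt, hpt, hs, rfl⟩
    refine ⟨pt, hpt, rfl, ?_⟩
    rw [PySem.Str.isIn_iff_infix, ← PySem.Chars.isIn_iff_infix]
    exact (exists_pos_startswith_iff ot.toList pt.1.toList (hne pt hpt)).1 ⟨i, hi, hs⟩
  · rintro ⟨pt, hpt, rfl, hin⟩
    rw [PySem.Str.isIn_iff_infix, ← PySem.Chars.isIn_iff_infix] at hin
    obtain ⟨i, hi, hs⟩ := (exists_pos_startswith_iff ot.toList pt.1.toList (hne pt hpt)).2 hin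
    exact ⟨i, hi, pt, hpt, hs, rfl⟩

-- ===== VERDICT (by name: the statement is the Claim_ definition above) =====
set_option maxHeartbeats 2000000 in
theorem components_for_risk_spec : Claim_equal_components_for_risk := by
  intro ot _
  unfold Spec_components_for_risk components_for_risk components_for_risk_alt pvTagOrder
  have hmem : ∀ x : String,
      PySem.Set.contains ((PySem.List.pyRange 0 (PySem.Str.len (PySem.Str.upper ot)) 1).foldl
        (fun h i => pvPatTag.foldl
          (fun h' pt => if PySem.Chars.startswith ((PySem.Str.upper ot).toList.drop i.toNat) pt.1.toList
                        then PySem.Set.add h' pt.2 else h') h)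
        PySem.Set.empty) x =
      decide (∃ pt ∈ pvPatTag, x = pt.2 ∧ PySem.Str.isIn pt.1 (PySem.Str.upper ot) = true) := by
    intro x
    rw [Bool.eq_iff_iff, PySem.Set.contains_iff, decide_eq_true_iff]
    exact mem_hit_iff (PySem.Str.upper ot) x
  simp only [List.filter_cons, List.filter_nil, hmem]
  have e1 : decide (∃ pt ∈ pvPatTag, "FM" = pt.2 ∧ PySem.Str.isIn pt.1 (PySem.Str.upper ot) = true) =
      (PySem.Str.isIn "FM" (PySem.Str.upper ot) || PySem.Str.isIn "DBM" (PySem.Str.upper ot) ||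
       PySem.Str.isIn "FIN" (PySem.Str.upper ot)) := by
    rw [Bool.eq_iff_iff, decide_eq_true_iff]
    constructor
    · rintro ⟨pt, hpt, he, hin⟩
      simp only [pvPatTag, List.mem_cons, List.not_mem_nil, or_false] at hpt
      rcases hpt with rfl | rfl | rfl | rfl | rfl | rfl | rfl | rfl | rfl | rfl
      · simp at hin ⊢; tauto
      · simp at hin ⊢; tauto
      · simp at hin ⊢; tauto
      all_goals exact absurd he (by decide)
    · intro h
      rcases Bool.or_eq_true_iff.1 h with h | h
      · rcases Bool.or_eq_true_iff.1 h with h | h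
        · exact ⟨("FM", "FM"), by decide, rfl, h⟩
        · exact ⟨("DBM", "FM"), by decide, rfl, h⟩
      · exact ⟨("FIN", "FM"), by decide, rfl, h⟩
  have e2 : decide (∃ pt ∈ pvPatTag, "PS-WBS" = pt.2 ∧ PySem.Str.isIn pt.1 (PySem.Str.upper ot) = true) =
      (PySem.Str.isIn "PS" (PySem.Str.upper ot) || PySem.Str.isIn "WBS" (PySem.Str.upper ot) ||
       PySem.Str.isIn "EPM" (PySem.Str.upper ot) || PySem.Str.isIn "BSP" (PySem.Str.upper ot)) := by
    rw [Bool.eq_iff_iff, decide_eq_true_iff]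
    constructor
    · rintro ⟨pt, hpt, he, hin⟩
      simp only [pvPatTag, List.mem_cons, List.not_mem_nil, or_false] at hpt
      rcases hpt with rfl | rfl | rfl | rfl | rfl | rfl | rfl | rfl | rfl | rfl
      · exact absurd he (by decide)
      · exact absurd he (by decide)
      · exact absurd he (by decide)
      · simp at hin ⊢; tauto
      · simp at hin ⊢; tauto
      · simp at hin ⊢; tauto
      · simp at hin ⊢; tauto
      all_goals exact absurd he (by decide)
    · intro h
      rcases Bool.or_eq_true_iff.1 h with h | h
      · rcases Bool.or_eq_true_iff.1 h with h | h
        · rcases Bool.or_eq_true_iff.1 h with h | h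
          · exact ⟨("PS", "PS-WBS"), by decide, rfl, h⟩
          · exact ⟨("WBS", "PS-WBS"), by decide, rfl, h⟩
        · exact ⟨("EPM", "PS-WBS"), by decide, rfl, h⟩
      · exact ⟨("BSP", "PS-WBS"), by decide, rfl, h⟩
  have e3 : decide (∃ pt ∈ pvPatTag, "BP-GM" = pt.2 ∧ PySem.Str.isIn pt.1 (PySem.Str.upper ot) = true) =
      (PySem.Str.isIn "BSP" (PySem.Str.upper ot) || PySem.Str.isIn "BP" (PySem.Str.upper ot) ||
       PySem.Str.isIn "GM" (PySem.Str.upper ot)) := by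
    rw [Bool.eq_iff_iff, decide_eq_true_iff]
    constructor
    · rintro ⟨pt, hpt, he, hin⟩
      simp only [pvPatTag, List.mem_cons, List.not_mem_nil, or_false] at hpt
      rcases hpt with rfl | rfl | rfl | rfl | rfl | rfl | rfl | rfl | rfl | rfl
      · exact absurd he (by decide)
      · exact absurd he (by decide)
      · exact absurd he (by decide)
      · exact absurd he (by decide)
      · exact absurd he (by decide)
      · exact absurd he (by decide)
      · exact absurd he (by decide)
      · simp at hin ⊢; tauto
      · simp at hin ⊢; tauto
      · simp at hin ⊢; tauto
    · intro h
      rcases Bool.or_eq_true_iff.1 h with h | h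
      · rcases Bool.or_eq_true_iff.1 h with h | h
        · exact ⟨("BSP", "BP-GM"), by decide, rfl, h⟩
        · exact ⟨("BP", "BP-GM"), by decide, rfl, h⟩
      · exact ⟨("GM", "BP-GM"), by decide, rfl, h⟩
  rw [e1, e2, e3]
  generalize (PySem.Str.isIn "FM" (PySem.Str.upper ot) || PySem.Str.isIn "DBM" (PySem.Str.upper ot) ||
       PySem.Str.isIn "FIN" (PySem.Str.upper ot)) = c1
  generalize (PySem.Str.isIn "PS" (PySem.Str.upper ot) || PySem.Str.isIn "WBS" (PySem.Str.upper ot) ||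
       PySem.Str.isIn "EPM" (PySem.Str.upper ot) || PySem.Str.isIn "BSP" (PySem.Str.upper ot)) = c2
  generalize (PySem.Str.isIn "BSP" (PySem.Str.upper ot) || PySem.Str.isIn "BP" (PySem.Str.upper ot) ||
       PySem.Str.isIn "GM" (PySem.Str.upper ot)) = c3
  revert c1 c2 c3
  decide
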